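-- pv_equiv track=rewrite | github.com/docxology/codomyrmex | scripts/review/pr_analyzer.py | parse_diff_files
-- ===== SOURCE A (Python) =====
-- def parse_diff_files(diff_text: str) -> dict[str, list[str]]:
--     """Map path -> list of added/changed line contents (no leading +)."""
--     files: dict[str, list[str]] = {}
--     current: str | None = None
--     for line in diff_text.splitlines():
--         if line.startswith("diff --git "):
--             current = None
--             continue
--         if line.startswith("+++ b/"):
--             current = line[6:].strip()
--             if current == "/dev/null":
--                 current = None
--             elif current:
--                 files.setdefault(current, [])
--             continue
--         if current and line.startswith("+") and not line.startswith("+++"):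
--             files[current].append(line[1:])
--     return files
-- ===== SOURCE B (Python) =====
-- def _split_at(lines, pred):
--     """Partition lines into groups; each line satisfying pred starts a new group
--     (kept as the group's first line). The (possibly empty) preamble is group 0."""
--     groups = []
--     cur = []
--     for line in lines:
--         if pred(line):
--             groups.append(cur)
--             cur = [line]
--         else:
--             cur.append(line)
--     groups.append(cur)
--     return groups
--
--
-- def parse_diff_files(diff_text: str) -> dict[str, list[str]]:
--     """Map path -> list of added/changed line contents (no leading +)."""
--     files: dict[str, list[str]] = {}
--     for seg in _split_at(diff_text.splitlines(), lambda l: l.startswith("diff --git ")):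
--         for sub in _split_at(seg, lambda l: l.startswith("+++ b/"))[1:]:
--             target = sub[0][6:].strip()
--             if target == "/dev/null" or not target:
--                 continue
--             added = [line[1:] for line in sub[1:]
--                      if line.startswith("+") and not line.startswith("+++")]
--             files.setdefault(target, []).extend(added)
--     return files
-- ===== Notes on version B (the rewrite author's own statement) =====
-- stated objective: alternative
-- what changed: Replaces A's single stateful line loop (a current-path register mutated across the whole diff) with a two-level partition: split the lines into per-file segments at the git diff headers, split each segment into sub-hunks at the target-path headers, drop each preamble group, and register/extend each sub-hunk's target with a filtered comprehension of its plus-lines.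
import Mathlib
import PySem

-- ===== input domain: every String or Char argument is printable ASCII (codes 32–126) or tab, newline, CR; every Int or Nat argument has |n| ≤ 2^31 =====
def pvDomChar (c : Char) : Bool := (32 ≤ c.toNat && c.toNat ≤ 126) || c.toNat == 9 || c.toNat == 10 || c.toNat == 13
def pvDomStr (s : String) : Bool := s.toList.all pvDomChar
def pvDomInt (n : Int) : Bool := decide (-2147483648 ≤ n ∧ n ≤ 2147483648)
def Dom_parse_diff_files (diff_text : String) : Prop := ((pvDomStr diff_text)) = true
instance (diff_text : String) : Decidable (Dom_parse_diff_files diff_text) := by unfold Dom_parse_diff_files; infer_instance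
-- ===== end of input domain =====

-- B replaces A's single stateful line loop with a two-level partition (per-file
-- segments at the git diff headers, sub-hunks at the target-path headers) processed
-- per sub-hunk; same cost, different decomposition ("alternative").

-- shared per-line primitives (the startswith/strip/slice expressions both Pythons use)
def pvIsDiff (l : String) : Bool := PySem.Str.startswith l "diff --git "
def pvIsPlusHdr (l : String) : Bool := PySem.Str.startswith l "+++ b/"
def pvIsAdd (l : String) : Bool := PySem.Str.startswith l "+" && !PySem.Str.startswith l "+++"
def pvTarget (l : String) : String := PySem.Str.strip (PySem.Str.slice l (some 6) none)   -- line[6:].strip()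
def pvCut (l : String) : String := PySem.Str.slice l (some 1) none                         -- line[1:]

-- ===== PORT A =====
-- A's loop body: state = (files, current)
def pvStepA (st : PySem.Dict String (List String) × Option String) (line : String) :
    PySem.Dict String (List String) × Option String :=
  if pvIsDiff line then (st.1, none)
  else if pvIsPlusHdr line then
    let c := pvTarget line
    if c = "/dev/null" then (st.1, none)
    else if c = "" then (st.1, some c)
    else (st.1.setdefault c [], some c)
  else
    match st.2 with
    | none => st
    | some t =>
      if t = "" then st
      else if pvIsAdd line then (st.1.modify t [] (fun v => v ++ [pvCut line]), some t)
      else st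

def parse_diff_files (diff_text : String) : List (String × List String) :=
  (((PySem.Str.splitlines diff_text).foldl pvStepA (PySem.Dict.empty, none)).1).items

-- ===== PORT B =====
-- _split_at: groups = []; cur = []; append cur at each pred line; trailing append
def pvSplitAt (pred : String → Bool) (lines : List String) : List (List String) :=
  let st := lines.foldl
    (fun (st : List (List String) × List String) line =>
      if pred line then (st.1 ++ [st.2], [line]) else (st.1, st.2 ++ [line]))
    ([], [])
  st.1 ++ [st.2]

-- the comprehension [line[1:] for line in body if ...]
def pvAdded (body : List String) : List String := (body.filter pvIsAdd).map pvCut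

def pvProcSub (d : PySem.Dict String (List String)) (sub : List String) :
    PySem.Dict String (List String) :=
  let t := pvTarget sub.headI
  if t = "/dev/null" ∨ t = "" then d
  else (d.setdefault t []).modify t [] (fun v => v ++ pvAdded (sub.drop 1))

def pvProcSeg (d : PySem.Dict String (List String)) (seg : List String) :
    PySem.Dict String (List String) :=
  ((pvSplitAt pvIsPlusHdr seg).drop 1).foldl pvProcSub d

def parse_diff_files_alt (diff_text : String) : List (String × List String) :=
  ((pvSplitAt pvIsDiff (PySem.Str.splitlines diff_text)).foldl pvProcSeg PySem.Dict.empty).items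

-- ===== PRECONDITION & SPEC =====
def Spec_parse_diff_files (diff_text : String) (out : List (String × List String)) : Prop := out = parse_diff_files_alt diff_text
instance (diff_text : String) (out : List (String × List String)) : Decidable (Spec_parse_diff_files diff_text out) := by unfold Spec_parse_diff_files; infer_instance

-- ===== CLAIM (what is proved, stated in full; the proofs are below) =====
def Claim_equal_parse_diff_files : Prop := ∀ (diff_text : String), Dom_parse_diff_files diff_text → Spec_parse_diff_files diff_text (parse_diff_files diff_text)

-- ===== LEMMAS AND PROOFS =====

-- recursive characterisation of pvSplitAt
def pvGroups (pred : String → Bool) : List String → List String → List (List String)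
  | acc, [] => [acc]
  | acc, l :: ls => if pred l then acc :: pvGroups pred [l] ls else pvGroups pred (acc ++ [l]) ls

lemma pvSplit_fold (pred : String → Bool) (ls : List String) :
    ∀ (gs : List (List String)) (acc : List String),
      (ls.foldl (fun (st : List (List String) × List String) line =>
          if pred line then (st.1 ++ [st.2], [line]) else (st.1, st.2 ++ [line])) (gs, acc)).1
        ++ [(ls.foldl (fun (st : List (List String) × List String) line =>
          if pred line then (st.1 ++ [st.2], [line]) else (st.1, st.2 ++ [line])) (gs, acc)).2]
      = gs ++ pvGroups pred acc ls := by
  induction ls with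
  | nil => intro gs acc; simp [pvGroups]
  | cons l ls ih =>
    intro gs acc
    by_cases h : pred l = true
    · simp only [List.foldl_cons, h, if_pos, pvGroups]
      rw [ih (gs ++ [acc]) [l]]
      simp
    · simp only [List.foldl_cons, pvGroups, h, if_neg, Bool.false_eq_true, not_false_iff]
      rw [ih gs (acc ++ [l])]

lemma pvSplitAt_eq (pred : String → Bool) (ls : List String) :
    pvSplitAt pred ls = pvGroups pred [] ls := by
  unfold pvSplitAt
  simpa using pvSplit_fold pred ls [] []

lemma pvGroups_decomp (pred : String → Bool) (ls : List String) :
    ∀ (acc : List String), ∃ p subs,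
      pvGroups pred acc ls = (acc ++ p) :: subs ∧
      ls = p ++ subs.flatten ∧
      (∀ x ∈ p, pred x = false) ∧
      (∀ s ∈ subs, ∃ h t, s = h :: t ∧ pred h = true ∧ ∀ x ∈ t, pred x = false) := by
  induction ls with
  | nil =>
    intro acc
    exact ⟨[], [], by simp [pvGroups], by simp, by simp, by simp⟩
  | cons l ls ih =>
    intro acc
    by_cases h : pred l = true
    · obtain ⟨p', subs', h1, h2, h3, h4⟩ := ih [l]
      refine ⟨[], (l :: p') :: subs', ?_, ?_, by simp, ?_⟩
      · simp [pvGroups, h, h1]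
      · simp [h2]
      · intro s hs
        rcases List.mem_cons.mp hs with hs | hs
        · exact ⟨l, p', by simp [hs], h, h3⟩
        · exact h4 s hs
    · obtain ⟨p', subs', h1, h2, h3, h4⟩ := ih (acc ++ [l])
      refine ⟨l :: p', subs', ?_, by simp [h2], ?_, h4⟩
      · simp only [pvGroups, h, if_neg, Bool.false_eq_true, not_false_iff]
        simpa using h1
      · intro x hx
        rcases List.mem_cons.mp hx with hx | hx
        · simpa [hx] using (by simpa using h)
        · exact h3 x hx

-- dictionary lemmas
lemma dict_contains_all_false {κ ν : Type} [BEq κ] (d : PySem.Dict κ ν) (k : κ)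
    (hc : d.contains k = false) : ∀ p ∈ d.items, (p.1 == k) = false := by
  intro p hp
  have := hc
  unfold PySem.Dict.contains at this
  rw [List.any_eq_false] at this
  simpa using this p hp

lemma dict_insert_insert {κ ν : Type} [BEq κ] [LawfulBEq κ] (d : PySem.Dict κ ν) (k : κ) (a b : ν) :
    (d.insert k a).insert k b = d.insert k b := by
  apply PySem.Dict.ext
  by_cases hc : d.contains k = true
  · rw [PySem.Dict.items_insert_of_contains _ b (PySem.Dict.contains_insert_self d k a),
        PySem.Dict.items_insert_of_contains _ a hc,
        PySem.Dict.items_insert_of_contains _ b hc, List.map_map]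
    apply List.map_congr_left
    intro p _
    by_cases h : (p.1 == k) = true <;> simp [h]
  · have hc' : d.contains k = false := by simpa using hc
    rw [PySem.Dict.items_insert_of_contains _ b (PySem.Dict.contains_insert_self d k a),
        PySem.Dict.items_insert_of_not_contains _ a hc',
        PySem.Dict.items_insert_of_not_contains _ b hc']
    rw [List.map_append]
    have : List.map (fun p => if (p.1 == k) = true then (k, b) else p) d.items = d.items := by
      apply List.map_congr_left ?_ |>.trans (List.map_id _)
      intro p hp
      simp [dict_contains_all_false d k hc' p hp]
    simp [this]

lemma dict_modify_modify {κ ν : Type} [BEq κ] [LawfulBEq κ] (d : PySem.Dict κ ν) (k : κ)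
    (dflt : ν) (f g : ν → ν) :
    (d.modify k dflt f).modify k dflt g = d.modify k dflt (fun v => g (f v)) := by
  unfold PySem.Dict.modify
  rw [PySem.Dict.getD_insert_self, dict_insert_insert]

lemma dict_insert_getD_self {κ ν : Type} [BEq κ] [LawfulBEq κ] (d : PySem.Dict κ ν) (k : κ)
    (dflt : ν) (hnd : d.keys.Nodup) (hc : d.contains k = true) :
    d.insert k (d.getD k dflt) = d := by
  apply PySem.Dict.ext
  rw [PySem.Dict.items_insert_of_contains _ _ hc]
  apply List.map_congr_left ?_ |>.trans (List.map_id _)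
  intro p hp
  by_cases h : (p.1 == k) = true
  · have hk : p.1 = k := by simpa using h
    have hget : d.get? k = some p.2 := by
      apply PySem.Dict.get?_of_mem_items _ _ hnd
      rw [← hk]; exact hp
    have hval := PySem.Dict.getD_of_get?_eq_some d dflt hget
    rw [if_pos h, hval, ← hk]
    rfl
  · simp [h]

lemma dict_nodup_setdefault {κ ν : Type} [BEq κ] [LawfulBEq κ] (d : PySem.Dict κ ν) (k : κ) (v : ν)
    (hnd : d.keys.Nodup) : (d.setdefault k v).keys.Nodup := by
  by_cases hc : d.contains k = true
  · rw [PySem.Dict.setdefault_of_contains _ _ hc]; exact hnd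
  · rw [PySem.Dict.setdefault_of_not_contains _ _ (by simpa using hc)]
    exact PySem.Dict.nodup_keys_insert d k v hnd

lemma dict_nodup_modify {κ ν : Type} [BEq κ] [LawfulBEq κ] (d : PySem.Dict κ ν) (k : κ)
    (dflt : ν) (f : ν → ν) (hnd : d.keys.Nodup) : (d.modify k dflt f).keys.Nodup := by
  unfold PySem.Dict.modify
  exact PySem.Dict.nodup_keys_insert _ _ _ hnd

lemma dict_contains_modify_self {κ ν : Type} [BEq κ] [LawfulBEq κ] (d : PySem.Dict κ ν) (k : κ)
    (dflt : ν) (f : ν → ν) : (d.modify k dflt f).contains k = true := by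
  unfold PySem.Dict.modify
  exact PySem.Dict.contains_insert_self _ _ _

lemma dict_contains_setdefault_self {κ ν : Type} [BEq κ] [LawfulBEq κ] (d : PySem.Dict κ ν)
    (k : κ) (v : ν) : (d.setdefault k v).contains k = true := by
  rw [PySem.Dict.contains_setdefault]; simp

-- a "diff --git " line is not a "+++ b/" line
lemma pvNotPlus_of_Diff (l : String) (h : pvIsDiff l = true) : pvIsPlusHdr l = false := by
  unfold pvIsDiff at h
  unfold pvIsPlusHdr PySem.Str.startswith
  unfold PySem.Str.startswith at h
  rw [PySem.Chars.startswith_iff] at h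
  by_contra hP
  rw [Bool.not_eq_false, PySem.Chars.startswith_iff] at hP
  obtain ⟨t1, h1⟩ := h
  rw [← h1] at hP
  simp [List.cons_prefix_cons] at hP

-- step of the "+"-collection loop
def pvAppStep (t : String) (d : PySem.Dict String (List String)) (l : String) :
    PySem.Dict String (List String) :=
  if pvIsAdd l then d.modify t [] (fun v => v ++ [pvCut l]) else d

-- value of an inert (no-header) chunk under A's loop
def pvCollect (d : PySem.Dict String (List String)) (c : Option String)
    (chunk : List String) : PySem.Dict String (List String) :=
  match c with
  | none => d
  | some t => if t = "" then d else chunk.foldl (pvAppStep t) d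

lemma pvFoldA_inert (chunk : List String) :
    ∀ (d : PySem.Dict String (List String)) (c : Option String),
      (∀ x ∈ chunk, pvIsDiff x = false ∧ pvIsPlusHdr x = false) →
      chunk.foldl pvStepA (d, c) = (pvCollect d c chunk, c) := by
  induction chunk with
  | nil => intro d c _; cases c with
    | none => simp [pvCollect]
    | some t => by_cases h : t = "" <;> simp [pvCollect, h]
  | cons l chunk ih =>
    intro d c h
    obtain ⟨hD, hP⟩ := h l (by simp)
    have hrest : ∀ x ∈ chunk, pvIsDiff x = false ∧ pvIsPlusHdr x = false :=
      fun x hx => h x (by simp [hx])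
    cases c with
    | none =>
      simp only [List.foldl_cons]
      have : pvStepA (d, none) l = (d, none) := by simp [pvStepA, hD, hP]
      rw [this, ih d none hrest]
      simp [pvCollect]
    | some t =>
      by_cases ht : t = ""
      · simp only [List.foldl_cons]
        have : pvStepA (d, some t) l = (d, some t) := by simp [pvStepA, hD, hP, ht]
        rw [this, ih d (some t) hrest]
        simp [pvCollect, ht]
      · by_cases ha : pvIsAdd l = true
        · simp only [List.foldl_cons]
          have : pvStepA (d, some t) l = (d.modify t [] (fun v => v ++ [pvCut l]), some t) := by
            simp [pvStepA, hD, hP, ht, ha]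
          rw [this, ih _ (some t) hrest]
          simp [pvCollect, ht, pvAppStep, ha]
        · simp only [List.foldl_cons]
          have : pvStepA (d, some t) l = (d, some t) := by
            simp [pvStepA, hD, hP, ht, ha]
          rw [this, ih d (some t) hrest]
          simp [pvCollect, ht, pvAppStep, ha]

lemma pvAppStep_fold (chunk : List String) :
    ∀ (d : PySem.Dict String (List String)) (t : String),
      d.keys.Nodup → d.contains t = true →
      chunk.foldl (pvAppStep t) d = d.modify t [] (fun v => v ++ pvAdded chunk) := by
  induction chunk with
  | nil =>
    intro d t hnd hc
    simp only [List.foldl_nil, pvAdded, List.filter_nil, List.map_nil]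
    unfold PySem.Dict.modify
    simp [dict_insert_getD_self d t [] hnd hc]
  | cons l chunk ih =>
    intro d t hnd hc
    by_cases ha : pvIsAdd l = true
    · simp only [List.foldl_cons, pvAppStep, ha, if_pos]
      rw [ih _ t (dict_nodup_modify d t [] _ hnd) (dict_contains_modify_self d t [] _)]
      rw [dict_modify_modify]
      have : pvAdded (l :: chunk) = pvCut l :: pvAdded chunk := by
        simp [pvAdded, ha]
      rw [this]
      congr 1
      funext v
      simp
    · simp only [List.foldl_cons, pvAppStep, ha, if_neg, Bool.false_eq_true, not_false_iff]
      rw [ih d t hnd hc]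
      have : pvAdded (l :: chunk) = pvAdded chunk := by
        simp [pvAdded, ha]
      rw [this]

-- A's loop preserves nodup keys
lemma pvStepA_nodup (ls : List String) :
    ∀ (st : PySem.Dict String (List String) × Option String),
      st.1.keys.Nodup → ((ls.foldl pvStepA st).1).keys.Nodup := by
  induction ls with
  | nil => intro st h; simpa using h
  | cons l ls ih =>
    intro st h
    simp only [List.foldl_cons]
    apply ih
    unfold pvStepA
    by_cases hD : pvIsDiff l = true
    · simpa [hD] using h
    · by_cases hP : pvIsPlusHdr l = true
      · simp only [hD, hP, if_pos, if_neg, Bool.false_eq_true, not_false_iff]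
        by_cases h1 : pvTarget l = "/dev/null"
        · simpa [h1] using h
        · by_cases h2 : pvTarget l = ""
          · simpa [h1, h2] using h
          · simpa [h1, h2] using dict_nodup_setdefault st.1 (pvTarget l) [] h
      · simp only [hD, hP, if_neg, Bool.false_eq_true, not_false_iff]
        cases hst : st.2 with
        | none => simpa using h
        | some t =>
          by_cases h1 : t = ""
          · simpa [h1] using h
          · by_cases h2 : pvIsAdd l = true
            · have := dict_nodup_modify st.1 t [] (fun v => v ++ [pvCut l]) h
              simpa [h1, h2, PySem.Dict.modify] using this
            · simpa [h1, h2] using h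

-- one run of sub-hunks (each headed by a '+++ b/' line) agrees with B's pvProcSub fold
lemma pvSubs_fold (subs : List (List String)) :
    ∀ (d : PySem.Dict String (List String)) (c : Option String),
      d.keys.Nodup →
      (∀ s ∈ subs, ∃ h t, s = h :: t ∧ pvIsPlusHdr h = true ∧ ∀ x ∈ t, pvIsPlusHdr x = false) →
      (∀ x ∈ subs.flatten, pvIsDiff x = false) →
      ((subs.flatten).foldl pvStepA (d, c)).1 = subs.foldl pvProcSub d := by
  induction subs with
  | nil => intro d c _ _ _; simp
  | cons s subs ih =>
    intro d c hnd hsubs hD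
    obtain ⟨h, t, hseq, hPh, hPt⟩ := hsubs s (by simp)
    subst hseq
    have hDh : pvIsDiff h = false := hD h (by simp)
    have hDt : ∀ x ∈ t, pvIsDiff x = false := fun x hx => hD x (by simp [hx])
    have hDrest : ∀ x ∈ subs.flatten, pvIsDiff x = false := fun x hx => hD x (by simp [hx])
    have hsubsrest : ∀ s ∈ subs, ∃ h t, s = h :: t ∧ pvIsPlusHdr h = true ∧
        ∀ x ∈ t, pvIsPlusHdr x = false := fun s hs => hsubs s (by simp [hs])
    have hinert : ∀ x ∈ t, pvIsDiff x = false ∧ pvIsPlusHdr x = false :=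
      fun x hx => ⟨hDt x hx, hPt x hx⟩
    simp only [List.flatten_cons, List.foldl_cons, List.foldl_append]
    -- step on the header h
    by_cases h1 : pvTarget h = "/dev/null"
    · have hstep : pvStepA (d, c) h = (d, none) := by simp [pvStepA, hDh, hPh, h1]
      rw [hstep, pvFoldA_inert t d none hinert]
      have hpd : pvProcSub d (h :: t) = d := by simp [pvProcSub, h1]
      simp only [pvCollect]
      rw [hpd]
      exact ih d none hnd hsubsrest hDrest
    · by_cases h2 : pvTarget h = ""
      · have hstep : pvStepA (d, c) h = (d, some (pvTarget h)) := by
          simp [pvStepA, hDh, hPh, h1, h2]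
        rw [hstep, pvFoldA_inert t d (some (pvTarget h)) hinert]
        have hpd : pvProcSub d (h :: t) = d := by simp [pvProcSub, h2]
        have hcoll : pvCollect d (some (pvTarget h)) t = d := by
          simp [pvCollect, h2]
        rw [hcoll, hpd]
        exact ih d (some (pvTarget h)) hnd hsubsrest hDrest
      · have hstep : pvStepA (d, c) h = (d.setdefault (pvTarget h) [], some (pvTarget h)) := by
          simp [pvStepA, hDh, hPh, h1, h2]
        rw [hstep, pvFoldA_inert t _ (some (pvTarget h)) hinert]
        have hcoll : pvCollect (d.setdefault (pvTarget h) []) (some (pvTarget h)) t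
            = (d.setdefault (pvTarget h) []).modify (pvTarget h) []
                (fun v => v ++ pvAdded t) := by
          simp only [pvCollect, h2, if_neg, not_false_iff]
          exact pvAppStep_fold t _ (pvTarget h)
            (dict_nodup_setdefault d (pvTarget h) [] hnd)
            (dict_contains_setdefault_self d (pvTarget h) [])
        rw [hcoll]
        have hproc : pvProcSub d (h :: t)
            = (d.setdefault (pvTarget h) []).modify (pvTarget h) [] (fun v => v ++ pvAdded t) := by
          simp [pvProcSub, h1, h2]
        rw [← hproc]
        exact ih _ (some (pvTarget h))
          (by rw [hproc]
              exact dict_nodup_modify _ _ _ _ (dict_nodup_setdefault d (pvTarget h) [] hnd))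
          hsubsrest hDrest

-- one segment body (no 'diff --git ' lines) agrees with B's per-segment processing
lemma pvSeg_fold (tl : List String) (acc : List String) (d : PySem.Dict String (List String))
    (hnd : d.keys.Nodup) (hND : ∀ x ∈ tl, pvIsDiff x = false) :
    (tl.foldl pvStepA (d, none)).1
      = ((pvGroups pvIsPlusHdr acc tl).drop 1).foldl pvProcSub d := by
  obtain ⟨p, subs, h1, h2, h3, h4⟩ := pvGroups_decomp pvIsPlusHdr tl acc
  rw [h1]
  simp only [List.drop_succ_cons, List.drop_zero]
  have hinert : ∀ x ∈ p, pvIsDiff x = false ∧ pvIsPlusHdr x = false :=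
    fun x hx => ⟨hND x (by rw [h2]; simp [hx]), h3 x hx⟩
  rw [h2, List.foldl_append, pvFoldA_inert p d none hinert]
  simp only [pvCollect]
  exact pvSubs_fold subs d none hnd h4
    (fun x hx => hND x (by rw [h2]; simp [hx]))

-- the list of 'diff --git '-headed segments agrees with B's pvProcSeg fold
lemma pvSegs_fold (segs : List (List String)) :
    ∀ (d : PySem.Dict String (List String)) (c : Option String),
      d.keys.Nodup →
      (∀ s ∈ segs, ∃ h t, s = h :: t ∧ pvIsDiff h = true ∧ ∀ x ∈ t, pvIsDiff x = false) →
      ((segs.flatten).foldl pvStepA (d, c)).1 = segs.foldl pvProcSeg d := by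
  induction segs with
  | nil => intro d c _ _; simp
  | cons s segs ih =>
    intro d c hnd hsegs
    obtain ⟨h, t, hseq, hDh, hDt⟩ := hsegs s (by simp)
    subst hseq
    have hsegsrest : ∀ s ∈ segs, ∃ h t, s = h :: t ∧ pvIsDiff h = true ∧
        ∀ x ∈ t, pvIsDiff x = false := fun s hs => hsegs s (by simp [hs])
    simp only [List.flatten_cons, List.foldl_cons, List.foldl_append]
    have hstep : pvStepA (d, c) h = (d, none) := by simp [pvStepA, hDh]
    rw [hstep]
    have hs1 : ((t.foldl pvStepA (d, none)).1) = pvProcSeg d (h :: t) := by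
      rw [pvSeg_fold t [h] d hnd hDt]
      unfold pvProcSeg
      rw [pvSplitAt_eq]
      have : pvGroups pvIsPlusHdr [] (h :: t) = pvGroups pvIsPlusHdr [h] t := by
        simp [pvGroups, pvNotPlus_of_Diff h hDh]
      rw [this]
    have hnd1 : ((t.foldl pvStepA (d, none)).1).keys.Nodup :=
      pvStepA_nodup t (d, none) hnd
    rw [← Prod.mk.eta (p := t.foldl pvStepA (d, none))]
    rw [ih _ _ hnd1 hsegsrest, hs1]

-- ===== VERDICT (by name: the statement is the Claim_ definition above) =====
theorem parse_diff_files_spec : Claim_equal_parse_diff_files := by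
  intro diff_text _
  unfold Spec_parse_diff_files parse_diff_files parse_diff_files_alt
  congr 1
  obtain ⟨p0, segs, h1, h2, h3, h4⟩ :=
    pvGroups_decomp pvIsDiff (PySem.Str.splitlines diff_text) []
  rw [pvSplitAt_eq, h1]
  simp only [List.nil_append]
  rw [List.foldl_cons]
  rw [h2, List.foldl_append]
  rw [← Prod.mk.eta (p := p0.foldl pvStepA (PySem.Dict.empty, none))]
  rw [pvSegs_fold segs _ _
    (pvStepA_nodup p0 (PySem.Dict.empty, none) (by simp [PySem.Dict.keys_empty]))
    h4]
  congr 1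
  rw [pvSeg_fold p0 [] PySem.Dict.empty (by simp [PySem.Dict.keys_empty]) h3]
  unfold pvProcSeg
  rw [pvSplitAt_eq]
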